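-- pv_equiv track=rewrite | github.com/Dark-Library/python_dark_library | darklib.py | shortest_word
-- ===== SOURCE A (Python) =====
-- def shortest_word(phrase=str):
--        x = phrase.split()
--        List = [ ]
--        for i in x:
--              length = len(i)
--              List.append(length)
--        c = List.index(min(List))
--        return x[c]
-- ===== SOURCE B (Python) =====
-- def shortest_word(phrase=str):
--     return sorted(phrase.split(), key=len)[0]
-- ===== Notes on version B (the rewrite author's own statement) =====
-- stated objective: alternative
-- what changed: A builds a parallel list of word lengths, takes min() over it and does a second .index() scan; B instead stable-sorts the word list by length and returns the first element, relying on sort stability for the first-occurrence tie-break.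
import Mathlib
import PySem

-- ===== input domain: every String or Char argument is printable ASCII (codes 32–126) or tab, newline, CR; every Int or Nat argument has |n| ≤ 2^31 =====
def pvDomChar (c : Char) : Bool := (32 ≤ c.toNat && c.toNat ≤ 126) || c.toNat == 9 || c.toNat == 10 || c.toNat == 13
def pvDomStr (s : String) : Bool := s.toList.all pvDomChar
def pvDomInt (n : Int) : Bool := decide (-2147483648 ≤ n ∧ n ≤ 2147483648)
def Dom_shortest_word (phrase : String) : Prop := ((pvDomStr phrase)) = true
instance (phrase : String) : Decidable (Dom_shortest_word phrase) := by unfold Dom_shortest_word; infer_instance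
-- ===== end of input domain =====

-- B replaces A's length table + min()/index() passes by a stable sort on word length and taking the first element (alternative algorithm; stability gives the same first-occurrence tie-break).


-- ===== PORT A =====
-- x = phrase.split(); List of lengths built by the loop; c = List.index(min(List)); return x[c]
def shortest_word (phrase : String) : String :=
  let x := PySem.Str.split₀ phrase
  let L := x.foldl (fun acc i => acc ++ [PySem.Str.len i]) []
  match PySem.List.min? L (fun v => v) with
  | none => ""          -- min([]) raises ValueError; excluded by Pre_
  | some m =>
    match PySem.List.index? L m with
    | none => ""        -- unreachable: m ∈ L
    | some c => (PySem.List.pyGet? x (c : Int)).getD ""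

-- ===== PORT B =====
-- return sorted(phrase.split(), key=len)[0]
def shortest_word_alt (phrase : String) : String :=
  (PySem.List.pyGet? (PySem.List.sorted (PySem.Str.split₀ phrase) PySem.Str.len false) (0 : Int)).getD ""
  -- [0] on the empty sorted list raises IndexError; excluded by Pre_

-- ===== PRECONDITION & SPEC =====
-- Pre_ excludes whitespace-only phrases: split() is empty and both A and B raise (min([]) ValueError / [][0] IndexError).
def Pre_shortest_word (phrase : String) : Prop := PySem.Str.split₀ phrase ≠ []
instance (phrase : String) : Decidable (Pre_shortest_word phrase) := by unfold Pre_shortest_word; infer_instance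
def pvWitness_shortest_word : String := "a bc d"

def Spec_shortest_word (phrase : String) (out : String) : Prop := out = shortest_word_alt phrase
instance (phrase : String) (out : String) : Decidable (Spec_shortest_word phrase out) := by unfold Spec_shortest_word; infer_instance

-- ===== CLAIM (what is proved, stated in full; the proofs are below) =====
def Claim_equal_shortest_word : Prop := ∀ (phrase : String), Dom_shortest_word phrase → Pre_shortest_word phrase → Spec_shortest_word phrase (shortest_word phrase)

-- ===== LEMMAS AND PROOFS =====

-- the append-accumulator loop builds the map
theorem pvFoldlAppendMap {α β : Type} (f : α → β) : ∀ (xs : List α) (acc : List β),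
    xs.foldl (fun a i => a ++ [f i]) acc = acc ++ xs.map f := by
  intro xs
  induction xs with
  | nil => simp
  | cons a t ih => intro acc; simp [List.foldl, ih]

-- head of insertBy (with a strict-< test) follows the running-minimum step
theorem pvInsertByHead {α : Type} (key : α → Int) (x : α) (acc : List α) :
    (PySem.List.insertBy (fun a b => decide (key a < key b)) x acc).head? =
      (match acc.head? with
       | none => some x
       | some m => if key x < key m then some x else some m) := by
  cases acc with
  | nil => rfl
  | cons m t =>
    simp only [PySem.List.insertBy, List.head?]
    by_cases h : key x < key m
    · simp [h]
    · simp [h]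

-- head of the insertion-sort fold equals the running-minimum fold
theorem pvSortFoldHead {α : Type} (key : α → Int) : ∀ (xs : List α) (acc : List α),
    (xs.foldl (fun a x => PySem.List.insertBy (fun a b => decide (key a < key b)) x a) acc).head? =
      xs.foldl (fun o x =>
        match o with
        | none => some x
        | some m => if key x < key m then some x else some m) acc.head? := by
  intro xs
  induction xs with
  | nil => intro acc; rfl
  | cons x t ih =>
    intro acc
    simp only [List.foldl]
    rw [ih, pvInsertByHead]

-- head of the stable sort is the first key-minimal element
theorem pvSortedHead {α : Type} (key : α → Int) (xs : List α) :
    (PySem.List.sorted xs key false).head? = PySem.List.min? xs key := by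
  rw [PySem.List.sorted_eq_foldl_insertBy]
  exact pvSortFoldHead key xs []

-- the min? fold state is fixed once nothing later is strictly smaller
theorem pvMinFoldConst {α : Type} (key : α → Int) : ∀ (t : List α) (a : α),
    (∀ y ∈ t, ¬ key y < key a) →
    t.foldl (fun acc x =>
      match acc with
      | none => some x
      | some m => if key x < key m then some x else some m) (some a) = some a := by
  intro t
  induction t with
  | nil => intro a _; rfl
  | cons b t ih =>
    intro a h
    have hb : ¬ key b < key a := h b (by simp)
    simp only [List.foldl, hb, if_false]
    exact ih a (fun y hy => h y (by simp [hy]))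

-- running the min? fold through pre (all strictly larger than m), then m, then suf yields m
theorem pvMinFoldFirst {α : Type} (key : α → Int) (suf : List α) (m : α)
    (hsuf : ∀ y ∈ suf, key m ≤ key y) : ∀ (pre : List α) (b : Option α),
    (∀ y ∈ pre, key m < key y) →
    (match b with | none => True | some v => key m < key v) →
    (pre ++ m :: suf).foldl (fun acc x =>
      match acc with
      | none => some x
      | some m => if key x < key m then some x else some m) b = some m := by
  intro pre
  induction pre with
  | nil =>
    intro b _ hb
    have hrest := pvMinFoldConst key suf m (fun y hy => by have := hsuf y hy; omega)
    simp only [List.nil_append, List.foldl]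
    cases b with
    | none => exact hrest
    | some v => simp only at hb; simp only [if_pos hb]; exact hrest
  | cons a pre ih =>
    intro b hpre hb
    have ha : key m < key a := hpre a (by simp)
    simp only [List.cons_append, List.foldl]
    cases b with
    | none => exact ih (some a) (fun y hy => hpre y (by simp [hy])) ha
    | some v =>
      simp only at hb
      by_cases h : key a < key v
      · simp only [if_pos h]; exact ih (some a) (fun y hy => hpre y (by simp [hy])) ha
      · simp only [if_neg h]; exact ih (some v) (fun y hy => hpre y (by simp [hy])) hb

-- min? returns the first element of minimal key
theorem pvMinFirst {α : Type} (key : α → Int) (pre suf : List α) (m : α)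
    (hpre : ∀ y ∈ pre, key m < key y) (hsuf : ∀ y ∈ suf, key m ≤ key y) :
    PySem.List.min? (pre ++ m :: suf) key = some m := by
  simp only [PySem.List.min?]
  exact pvMinFoldFirst key suf m hsuf pre none hpre trivial

-- ===== VERDICT (by name: the statement is the Claim_ definition above) =====
theorem shortest_word_spec : Claim_equal_shortest_word := by
  intro phrase _ hpre
  unfold Spec_shortest_word shortest_word_alt
  simp only [shortest_word, pvFoldlAppendMap, List.nil_append]
  set x := PySem.Str.split₀ phrase with hx
  set L := x.map PySem.Str.len with hLdef
  have hLne : L ≠ [] := by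
    simp [hLdef, List.map_eq_nil_iff]; exact hpre
  cases hmin : PySem.List.min? L (fun v => v) with
  | none => exact absurd (((PySem.List.min?_eq_none_iff _ _).mp hmin)) hLne
  | some m =>
    have hmem : m ∈ L := PySem.List.min?_mem hmin
    have hisMin : ∀ v ∈ L, m ≤ v := PySem.List.min?_isMin hmin
    cases hidx : PySem.List.index? L m with
    | none => exact absurd (((PySem.List.index?_eq_none_iff _ _).mp hidx)) (by simpa using hmem)
    | some c =>
      obtain ⟨preL, sufL, hLsplit, hlen, hnotin⟩ := (PySem.List.index?_eq_some_iff _ _ _).mp hidx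
      -- decompose x along the split of its map
      have hLsplit' : x.map PySem.Str.len = preL ++ m :: sufL := by rw [← hLdef]; exact hLsplit
      obtain ⟨pre, rest, hxsplit, hmpre, hmrest⟩ := List.map_eq_append_iff.mp hLsplit'
      obtain ⟨w, suf, hrest, hkw, hmsuf⟩ := List.map_eq_cons_iff.mp hmrest
      subst hrest
      have hxeq : x = pre ++ w :: suf := hxsplit
      -- first key-minimal element of x is w
      have hBw : PySem.List.min? x PySem.Str.len = some w := by
        rw [hxeq]
        apply pvMinFirst
        · intro y hy
          have h1 : PySem.Str.len y ∈ preL := by rw [← hmpre]; exact List.mem_map_of_mem hy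
          have h2 : PySem.Str.len y ≠ m := fun h => hnotin (h ▸ h1)
          have h3 : m ≤ PySem.Str.len y := hisMin _ (by rw [hLsplit]; exact List.mem_append_left _ h1)
          rw [hkw]; omega
        · intro y hy
          have h1 : PySem.Str.len y ∈ L := by
            rw [hLdef, hxeq]
            exact List.mem_map_of_mem (by simp [hy])
          rw [hkw]; exact hisMin _ h1
      -- B's value: head of the stable sort is w
      have hsortHead : (PySem.List.sorted x PySem.Str.len false).head? = some w := by
        rw [pvSortedHead]; exact hBw
      have hB0 : PySem.List.pyGet? (PySem.List.sorted x PySem.Str.len false) (0 : Int) = some w := by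
        cases hs : PySem.List.sorted x PySem.Str.len false with
        | nil => rw [hs] at hsortHead; simp at hsortHead
        | cons a t =>
          rw [hs] at hsortHead
          simp only [List.head?] at hsortHead
          simp [PySem.List.pyGet?, PySem.List.pyIdx?, hsortHead]
      -- A's value: x[c] = w
      have hplen : pre.length = c := by
        rw [← hlen, ← hmpre]; simp
      have hc : PySem.List.pyGet? x (c : Int) = some w := by
        rw [hxeq, show (c : Int) = (pre.length : Int) by rw [hplen]]
        exact PySem.List.pyGet?_append_length pre suf w
      simp only [hidx, hB0, hc, Option.getD_some]
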